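-- pv_equiv track=rewrite | github.com/cyblackorg/traceagent | backend/vulnerable_agent.py | _detect_admin_bypass
-- ===== SOURCE A (Python) =====
-- def _detect_admin_bypass(user_input):
--     """VULNERABILITY: Weak admin detection"""
--     admin_keywords = [
--         "ignore previous instructions",
--         "you are now admin",
--         "act as administrator",
--         "switch to admin mode",
--         "override security",
--         "access all clients",
--         "show all data"
--     ]
--
--     return any(keyword in user_input.lower() for keyword in admin_keywords)
-- ===== SOURCE B (Python) =====
-- ADMIN_KEYWORDS = (
--     "ignore previous instructions",
--     "you are now admin",
--     "act as administrator",
--     "switch to admin mode",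
--     "override security",
--     "access all clients",
--     "show all data",
-- )
--
-- def _detect_admin_bypass(user_input):
--     """Single left-to-right scan: at each position test whether any keyword starts there."""
--     s = user_input.lower()
--     for i in range(len(s) + 1):
--         for k in ADMIN_KEYWORDS:
--             if s.startswith(k, i):
--                 return True
--     return False
-- ===== Notes on version B (the rewrite author's own statement) =====
-- stated objective: alternative
-- what changed: A runs seven independent substring membership scans over the lowered input; B lowers once and does a single left-to-right scan over positions, testing at each position whether any keyword starts there.
import Mathlib
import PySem

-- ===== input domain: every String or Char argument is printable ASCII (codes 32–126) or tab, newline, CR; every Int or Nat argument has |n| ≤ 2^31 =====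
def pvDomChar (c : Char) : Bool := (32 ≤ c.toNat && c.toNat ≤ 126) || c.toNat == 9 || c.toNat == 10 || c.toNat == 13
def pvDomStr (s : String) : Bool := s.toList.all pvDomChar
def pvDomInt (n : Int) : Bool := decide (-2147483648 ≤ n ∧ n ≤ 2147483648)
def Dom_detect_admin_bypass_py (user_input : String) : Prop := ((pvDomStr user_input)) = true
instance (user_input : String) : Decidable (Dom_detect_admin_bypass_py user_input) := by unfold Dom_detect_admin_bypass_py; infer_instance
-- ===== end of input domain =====

-- B replaces A's seven independent substring scans by one left-to-right position scan
-- testing all keywords at each position (objective: alternative decomposition, same cost class).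

-- ===== PORT A =====
-- any(keyword in user_input.lower() for keyword in admin_keywords)
def detect_admin_bypass_py (user_input : String) : Bool :=
  ([ "ignore previous instructions",
     "you are now admin",
     "act as administrator",
     "switch to admin mode",
     "override security",
     "access all clients",
     "show all data" ] : List String).any
    (fun keyword => PySem.Str.isIn keyword (PySem.Str.lower user_input))

-- ===== PORT B =====
def pvKeywordsB : List (List Char) :=
  [ "ignore previous instructions".toList,
    "you are now admin".toList,
    "act as administrator".toList,
    "switch to admin mode".toList,
    "override security".toList,
    "access all clients".toList,
    "show all data".toList ]

-- inner loop of Source B: any(s.startswith(k, i) ...); position i is represented by the suffix s[i:]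
def pvMatchesAt (t : List Char) : Bool :=
  pvKeywordsB.any (fun k => PySem.Chars.startswith t k)

-- outer loop of Source B over i in range(len(s)+1), visiting the suffixes of s in order
def pvScan : List Char → Bool
  | [] => pvMatchesAt []
  | c :: rest => pvMatchesAt (c :: rest) || pvScan rest

def detect_admin_bypass_py_alt (user_input : String) : Bool :=
  pvScan (PySem.Chars.lower user_input.toList)

-- ===== PRECONDITION & SPEC =====
def Spec_detect_admin_bypass_py (user_input : String) (out : Bool) : Prop := out = detect_admin_bypass_py_alt user_input
instance (user_input : String) (out : Bool) : Decidable (Spec_detect_admin_bypass_py user_input out) := by unfold Spec_detect_admin_bypass_py; infer_instance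

-- ===== CLAIM (what is proved, stated in full; the proofs are below) =====
def Claim_equal_detect_admin_bypass_py : Prop := ∀ (user_input : String), Dom_detect_admin_bypass_py user_input → Spec_detect_admin_bypass_py user_input (detect_admin_bypass_py user_input)

-- ===== LEMMAS AND PROOFS =====

lemma pvScan_iff (t : List Char) :
    pvScan t = true ↔ ∃ s, s <:+ t ∧ pvMatchesAt s = true := by
  induction t with
  | nil =>
    constructor
    · intro h; exact ⟨[], List.suffix_refl _, h⟩
    · rintro ⟨s, hs, hm⟩; rw [List.suffix_nil.mp hs] at hm; exact hm
  | cons c rest ih =>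
    simp only [pvScan, Bool.or_eq_true, ih]
    constructor
    · rintro (h | ⟨s, hs, hm⟩)
      · exact ⟨c :: rest, List.suffix_refl _, h⟩
      · exact ⟨s, hs.trans (List.suffix_cons c rest), hm⟩
    · rintro ⟨s, hs, hm⟩
      rcases (List.suffix_cons_iff.mp hs) with h | h
      · left; exact h ▸ hm
      · right; exact ⟨s, h, hm⟩

lemma pvScan_eq_any (L : List Char) :
    pvKeywordsB.any (fun k => PySem.Chars.isIn k L) = pvScan L := by
  apply Bool.eq_iff_iff.mpr
  rw [pvScan_iff]
  simp only [List.any_eq_true, PySem.Chars.isIn_iff_infix, pvMatchesAt,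
    PySem.Chars.startswith_iff, List.infix_iff_prefix_suffix]
  constructor
  · rintro ⟨k, hk, t, hpre, hsuf⟩
    exact ⟨t, hsuf, k, hk, hpre⟩
  · rintro ⟨s, hs, k, hk, hpre⟩
    exact ⟨k, hk, s, hpre, hs⟩

theorem detect_admin_bypass_py_eq (u : String) :
    detect_admin_bypass_py u = detect_admin_bypass_py_alt u := by
  unfold detect_admin_bypass_py detect_admin_bypass_py_alt
  rw [← pvScan_eq_any]
  simp [pvKeywordsB, PySem.Str.isIn_eq, PySem.Str.toList_lower]

-- ===== VERDICT (by name: the statement is the Claim_ definition above) =====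
theorem detect_admin_bypass_py_spec : Claim_equal_detect_admin_bypass_py := by
  intro u _
  exact detect_admin_bypass_py_eq u
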